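-- pv_equiv track=rewrite | github.com/svaras98/portal-personas | contratos_fecha.py | limpiar_texto
-- ===== SOURCE A (Python) =====
-- def limpiar_texto(texto):
--     texto = texto.lower()
--
--     reemplazos = {
--         "mar20": "marzo",
--         "marz0": "marzo",
--         "setiembre": "septiembre",
--         "novienbre": "noviembre"
--     }
--
--     for k, v in reemplazos.items():
--         texto = texto.replace(k, v)
--
--     return texto
-- ===== SOURCE B (Python) =====
-- def limpiar_texto(texto):
--     reemplazos = {
--         "mar20": "marzo",
--         "marz0": "marzo",
--         "setiembre": "septiembre",
--         "novienbre": "noviembre"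
--     }
--     t = texto.lower()
--     out = []
--     i = 0
--     n = len(t)
--     while i < n:
--         for k, v in reemplazos.items():
--             if t.startswith(k, i):
--                 out.append(v)
--                 i += len(k)
--                 break
--         else:
--             out.append(t[i])
--             i += 1
--     return "".join(out)
-- ===== Notes on version B (the rewrite author's own statement) =====
-- stated objective: alternative
-- what changed: A lowercases and then makes four sequential full-string .replace passes; B lowercases and does a single left-to-right scan that consults the replacement table at each position, valid because the keys never overlap and no replacement value re-creates a key.
import Mathlib
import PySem

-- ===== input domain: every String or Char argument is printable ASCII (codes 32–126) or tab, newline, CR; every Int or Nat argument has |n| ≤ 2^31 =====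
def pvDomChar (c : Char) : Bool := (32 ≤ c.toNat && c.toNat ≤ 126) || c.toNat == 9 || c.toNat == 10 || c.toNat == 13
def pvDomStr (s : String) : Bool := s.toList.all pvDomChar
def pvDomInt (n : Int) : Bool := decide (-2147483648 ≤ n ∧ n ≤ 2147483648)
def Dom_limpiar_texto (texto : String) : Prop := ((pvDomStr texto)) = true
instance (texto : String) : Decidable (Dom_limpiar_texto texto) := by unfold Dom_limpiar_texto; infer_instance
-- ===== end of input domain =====

-- B replaces A's four sequential full-string `.replace` passes by ONE left-to-right scan that
-- consults the replacement table at each position; the outputs coincide because the keys never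
-- overlap each other and no replacement value re-creates a key (proved below).

-- ===== PORT A =====
def limpiar_texto (texto : String) : String :=
  -- texto = texto.lower()
  let t0 := PySem.Str.lower texto
  -- for k, v in reemplazos.items(): texto = texto.replace(k, v)   (dict literal, insertion order)
  let t1 := PySem.Str.replace t0 "mar20" "marzo"
  let t2 := PySem.Str.replace t1 "marz0" "marzo"
  let t3 := PySem.Str.replace t2 "setiembre" "septiembre"
  PySem.Str.replace t3 "novienbre" "noviembre"

-- ===== PORT B =====
-- Source B's while-loop over positions: at each position try the table keys in order (the dict
-- literal, unrolled), emit the value and skip the key on a match, else copy one character.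
def pvScan : List Char → List Char
  | [] => []
  | c :: t =>
    if "mar20".toList.isPrefixOf (c :: t) then "marzo".toList ++ pvScan ((c :: t).drop 5)
    else if "marz0".toList.isPrefixOf (c :: t) then "marzo".toList ++ pvScan ((c :: t).drop 5)
    else if "setiembre".toList.isPrefixOf (c :: t) then "septiembre".toList ++ pvScan ((c :: t).drop 9)
    else if "novienbre".toList.isPrefixOf (c :: t) then "noviembre".toList ++ pvScan ((c :: t).drop 9)
    else c :: pvScan t
termination_by l => l.length
decreasing_by all_goals simp [List.length_drop]

def limpiar_texto_alt (texto : String) : String :=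
  String.ofList (pvScan (PySem.Str.lower texto).toList)

-- ===== PRECONDITION & SPEC =====
def Spec_limpiar_texto (texto : String) (out : String) : Prop := out = limpiar_texto_alt texto
instance (texto : String) (out : String) : Decidable (Spec_limpiar_texto texto out) := by unfold Spec_limpiar_texto; infer_instance

-- ===== CLAIM (what is proved, stated in full; the proofs are below) =====
def Claim_equal_limpiar_texto : Prop := ∀ (texto : String), Dom_limpiar_texto texto → Spec_limpiar_texto texto (limpiar_texto texto)

-- ===== LEMMAS AND PROOFS =====

-- string-literal / char-list bridges
lemma pvTLmar20 : "mar20".toList = ['m','a','r','2','0'] := rfl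
lemma pvTLmarz0 : "marz0".toList = ['m','a','r','z','0'] := rfl
lemma pvTLmarzo : "marzo".toList = ['m','a','r','z','o'] := rfl
lemma pvTLsetiembre : "setiembre".toList = ['s','e','t','i','e','m','b','r','e'] := rfl
lemma pvTLseptiembre : "septiembre".toList = ['s','e','p','t','i','e','m','b','r','e'] := rfl
lemma pvTLnovienbre : "novienbre".toList = ['n','o','v','i','e','n','b','r','e'] := rfl
lemma pvTLnoviembre : "noviembre".toList = ['n','o','v','i','e','m','b','r','e'] := rfl

-- single-key str.replace as a structural scan (old = o :: os is nonempty)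
def pvRep (o : Char) (os new : List Char) : List Char → List Char
  | [] => []
  | c :: t =>
    if (o :: os).isPrefixOf (c :: t) then new ++ pvRep o os new ((c :: t).drop (os.length + 1))
    else c :: pvRep o os new t
termination_by l => l.length
decreasing_by all_goals simp [List.length_drop]

lemma pvGo_eq (o : Char) (os new : List Char) :
    ∀ (fuel : Nat) (l acc : List Char), l.length ≤ fuel →
      PySem.Chars.replace.go (o :: os) new fuel l acc = acc.reverse ++ pvRep o os new l := by
  intro fuel
  induction fuel with
  | zero =>
    intro l acc hl
    have : l = [] := List.eq_nil_of_length_eq_zero (Nat.le_zero.mp hl)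
    subst this
    rw [PySem.Chars.replace.go.eq_def]
    simp [pvRep]
  | succ n ih =>
    intro l acc hl
    cases l with
    | nil => rw [PySem.Chars.replace.go.eq_def]; simp [pvRep]
    | cons c t =>
      rw [PySem.Chars.replace.go.eq_def]
      by_cases h : (o :: os).isPrefixOf (c :: t) = true
      · simp only [h, if_pos]
        rw [ih _ _ (by simp at hl ⊢; omega)]
        rw [pvRep]
        simp [h]
      · simp only [h, Bool.false_eq_true, if_false]
        rw [ih _ _ (by simp at hl ⊢; omega)]
        rw [pvRep]
        simp [h]

lemma pvReplace_eq (o : Char) (os new l : List Char) :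
    PySem.Chars.replace l (o :: os) new = pvRep o os new l := by
  rw [PySem.Chars.replace]
  simp [pvGo_eq o os new l.length l [] (le_refl _)]

-- the four single-key scans of A's passes
def pvRep1 : List Char → List Char := pvRep 'm' ['a','r','2','0'] ['m','a','r','z','o']
def pvRep2 : List Char → List Char := pvRep 'm' ['a','r','z','0'] ['m','a','r','z','o']
def pvRep3 : List Char → List Char := pvRep 's' ['e','t','i','e','m','b','r','e'] ['s','e','p','t','i','e','m','b','r','e']
def pvRep4 : List Char → List Char := pvRep 'n' ['o','v','i','e','n','b','r','e'] ['n','o','v','i','e','m','b','r','e']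

-- the intermediate multi-key scans (keys 1..2 and 1..3 of the table)
def pvScan2 : List Char → List Char
  | [] => []
  | c :: t =>
    if ['m','a','r','2','0'].isPrefixOf (c :: t) then ['m','a','r','z','o'] ++ pvScan2 ((c :: t).drop 5)
    else if ['m','a','r','z','0'].isPrefixOf (c :: t) then ['m','a','r','z','o'] ++ pvScan2 ((c :: t).drop 5)
    else c :: pvScan2 t
termination_by l => l.length
decreasing_by all_goals simp [List.length_drop]

def pvScan3 : List Char → List Char
  | [] => []
  | c :: t =>
    if ['m','a','r','2','0'].isPrefixOf (c :: t) then ['m','a','r','z','o'] ++ pvScan3 ((c :: t).drop 5)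
    else if ['m','a','r','z','0'].isPrefixOf (c :: t) then ['m','a','r','z','o'] ++ pvScan3 ((c :: t).drop 5)
    else if ['s','e','t','i','e','m','b','r','e'].isPrefixOf (c :: t) then ['s','e','p','t','i','e','m','b','r','e'] ++ pvScan3 ((c :: t).drop 9)
    else c :: pvScan3 t
termination_by l => l.length
decreasing_by all_goals simp [List.length_drop]

-- transfer: pvRep1 neither destroys nor creates occurrences of any suffix of "marz0" at the front
lemma pvT1 : ∀ (n : Nat) (l : List Char), l.length ≤ n →
    ((['m','a','r','z','0'] <+: pvRep1 l ↔ ['m','a','r','z','0'] <+: l) ∧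
     (['a','r','z','0'] <+: pvRep1 l ↔ ['a','r','z','0'] <+: l) ∧
     (['r','z','0'] <+: pvRep1 l ↔ ['r','z','0'] <+: l) ∧
     (['z','0'] <+: pvRep1 l ↔ ['z','0'] <+: l) ∧
     (['0'] <+: pvRep1 l ↔ ['0'] <+: l)) := by
  intro n
  induction n with
  | zero =>
    intro l hl
    have : l = [] := List.eq_nil_of_length_eq_zero (Nat.le_zero.mp hl)
    subst this; simp [pvRep1, pvRep]
  | succ n ih =>
    intro l hl
    cases l with
    | nil => simp [pvRep1, pvRep]
    | cons c t =>
      by_cases hg : (['m','a','r','2','0'].isPrefixOf (c :: t)) = true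
      · obtain ⟨r, hr⟩ := List.isPrefixOf_iff_prefix.mp hg
        rw [← hr]
        simp [pvRep1, pvRep, List.cons_prefix_cons]
      · have ht : t.length ≤ n := by simp at hl; omega
        obtain ⟨i1, i2, i3, i4, i5⟩ := ih t ht
        simp only [pvRep1, pvRep, hg, Bool.false_eq_true, if_false]
        simp [List.cons_prefix_cons, pvRep1] at i2 i3 i4 i5 ⊢
        simp [i2, i3, i4, i5]

-- transfer: pvScan2 neither destroys nor creates occurrences of any suffix of "setiembre" at the front
lemma pvT2 : ∀ (n : Nat) (l : List Char), l.length ≤ n →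
    ((['s','e','t','i','e','m','b','r','e'] <+: pvScan2 l ↔ ['s','e','t','i','e','m','b','r','e'] <+: l) ∧
     (['e','t','i','e','m','b','r','e'] <+: pvScan2 l ↔ ['e','t','i','e','m','b','r','e'] <+: l) ∧
     (['t','i','e','m','b','r','e'] <+: pvScan2 l ↔ ['t','i','e','m','b','r','e'] <+: l) ∧
     (['i','e','m','b','r','e'] <+: pvScan2 l ↔ ['i','e','m','b','r','e'] <+: l) ∧
     (['e','m','b','r','e'] <+: pvScan2 l ↔ ['e','m','b','r','e'] <+: l) ∧
     (['m','b','r','e'] <+: pvScan2 l ↔ ['m','b','r','e'] <+: l) ∧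
     (['b','r','e'] <+: pvScan2 l ↔ ['b','r','e'] <+: l) ∧
     (['r','e'] <+: pvScan2 l ↔ ['r','e'] <+: l) ∧
     (['e'] <+: pvScan2 l ↔ ['e'] <+: l)) := by
  intro n
  induction n with
  | zero =>
    intro l hl
    have : l = [] := List.eq_nil_of_length_eq_zero (Nat.le_zero.mp hl)
    subst this; simp [pvScan2]
  | succ n ih =>
    intro l hl
    cases l with
    | nil => simp [pvScan2]
    | cons c t =>
      by_cases h1 : (['m','a','r','2','0'].isPrefixOf (c :: t)) = true
      · obtain ⟨r, hr⟩ := List.isPrefixOf_iff_prefix.mp h1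
        rw [← hr]
        simp [pvScan2, List.cons_prefix_cons]
      · by_cases h2 : (['m','a','r','z','0'].isPrefixOf (c :: t)) = true
        · obtain ⟨r, hr⟩ := List.isPrefixOf_iff_prefix.mp h2
          rw [← hr]
          simp [pvScan2, List.cons_prefix_cons]
        · have ht : t.length ≤ n := by simp at hl; omega
          obtain ⟨i1, i2, i3, i4, i5, i6, i7, i8, i9⟩ := ih t ht
          simp only [pvScan2, h1, h2, Bool.false_eq_true, if_false]
          simp [List.cons_prefix_cons] at i2 i3 i4 i5 i6 i7 i8 i9 ⊢
          simp [i2, i3, i4, i5, i6, i7, i8, i9]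

-- transfer: pvScan3 neither destroys nor creates occurrences of any suffix of "novienbre" at the front
lemma pvT3 : ∀ (n : Nat) (l : List Char), l.length ≤ n →
    ((['n','o','v','i','e','n','b','r','e'] <+: pvScan3 l ↔ ['n','o','v','i','e','n','b','r','e'] <+: l) ∧
     (['o','v','i','e','n','b','r','e'] <+: pvScan3 l ↔ ['o','v','i','e','n','b','r','e'] <+: l) ∧
     (['v','i','e','n','b','r','e'] <+: pvScan3 l ↔ ['v','i','e','n','b','r','e'] <+: l) ∧
     (['i','e','n','b','r','e'] <+: pvScan3 l ↔ ['i','e','n','b','r','e'] <+: l) ∧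
     (['e','n','b','r','e'] <+: pvScan3 l ↔ ['e','n','b','r','e'] <+: l) ∧
     (['n','b','r','e'] <+: pvScan3 l ↔ ['n','b','r','e'] <+: l) ∧
     (['b','r','e'] <+: pvScan3 l ↔ ['b','r','e'] <+: l) ∧
     (['r','e'] <+: pvScan3 l ↔ ['r','e'] <+: l) ∧
     (['e'] <+: pvScan3 l ↔ ['e'] <+: l)) := by
  intro n
  induction n with
  | zero =>
    intro l hl
    have : l = [] := List.eq_nil_of_length_eq_zero (Nat.le_zero.mp hl)
    subst this; simp [pvScan3]
  | succ n ih =>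
    intro l hl
    cases l with
    | nil => simp [pvScan3]
    | cons c t =>
      by_cases h1 : (['m','a','r','2','0'].isPrefixOf (c :: t)) = true
      · obtain ⟨r, hr⟩ := List.isPrefixOf_iff_prefix.mp h1
        rw [← hr]
        simp [pvScan3, List.cons_prefix_cons]
      · by_cases h2 : (['m','a','r','z','0'].isPrefixOf (c :: t)) = true
        · obtain ⟨r, hr⟩ := List.isPrefixOf_iff_prefix.mp h2
          rw [← hr]
          simp [pvScan3, List.cons_prefix_cons]
        · by_cases h3 : (['s','e','t','i','e','m','b','r','e'].isPrefixOf (c :: t)) = true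
          · obtain ⟨r, hr⟩ := List.isPrefixOf_iff_prefix.mp h3
            rw [← hr]
            simp [pvScan3, List.cons_prefix_cons]
          · have ht : t.length ≤ n := by simp at hl; omega
            obtain ⟨i1, i2, i3, i4, i5, i6, i7, i8, i9⟩ := ih t ht
            simp only [pvScan3, h1, h2, h3, Bool.false_eq_true, if_false]
            simp [List.cons_prefix_cons] at i2 i3 i4 i5 i6 i7 i8 i9 ⊢
            simp [i2, i3, i4, i5, i6, i7, i8, i9]

-- fusing pass 2 into pass 1
lemma pvL2 : ∀ (n : Nat) (l : List Char), l.length ≤ n → pvRep2 (pvRep1 l) = pvScan2 l := by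
  intro n
  induction n with
  | zero =>
    intro l hl
    have : l = [] := List.eq_nil_of_length_eq_zero (Nat.le_zero.mp hl)
    subst this; simp [pvRep1, pvRep2, pvRep, pvScan2]
  | succ n ih =>
    intro l hl
    cases l with
    | nil => simp [pvRep1, pvRep2, pvRep, pvScan2]
    | cons c t =>
      by_cases h1 : (['m','a','r','2','0'].isPrefixOf (c :: t)) = true
      · obtain ⟨r, hr⟩ := List.isPrefixOf_iff_prefix.mp h1
        have hrl : r.length ≤ n := by
          have := congrArg List.length hr; simp at this hl; omega
        rw [← hr]
        have e1 : pvRep1 (['m','a','r','2','0'] ++ r) = ['m','a','r','z','o'] ++ pvRep1 r := by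
          simp [pvRep1, pvRep]
        have e2 : ∀ X, pvRep2 (['m','a','r','z','o'] ++ X) = ['m','a','r','z','o'] ++ pvRep2 X := by
          intro X; simp [pvRep2, pvRep]
        rw [e1, e2, ih r hrl]
        simp [pvScan2]
      · by_cases h2 : (['m','a','r','z','0'].isPrefixOf (c :: t)) = true
        · obtain ⟨r, hr⟩ := List.isPrefixOf_iff_prefix.mp h2
          have hrl : r.length ≤ n := by
            have := congrArg List.length hr; simp at this hl; omega
          rw [← hr]
          have e1 : ∀ X, pvRep1 (['m','a','r','z','0'] ++ X) = ['m','a','r','z','0'] ++ pvRep1 X := by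
            intro X; simp [pvRep1, pvRep]
          have e2 : ∀ X, pvRep2 (['m','a','r','z','0'] ++ X) = ['m','a','r','z','o'] ++ pvRep2 X := by
            intro X; simp [pvRep2, pvRep]
          rw [e1, e2, ih r hrl]
          simp [pvScan2]
        · have ht : t.length ≤ n := by simp at hl; omega
          have hT := (pvT1 (n+1) (c :: t) hl).1
          have h2' : ¬ (['m','a','r','z','0'] <+: c :: t) := by
            simpa [List.isPrefixOf_iff_prefix] using h2
          have hstep1 : pvRep1 (c :: t) = c :: pvRep1 t := by
            simp only [pvRep1, pvRep, h1, Bool.false_eq_true, if_false]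
          rw [hstep1] at hT
          have hg2 : ¬ (['m','a','r','z','0'] <+: c :: pvRep1 t) := fun hcon => h2' (hT.mp hcon)
          have hb2 : (['m','a','r','z','0'].isPrefixOf (c :: pvRep1 t)) = false := by
            rw [← Bool.not_eq_true, List.isPrefixOf_iff_prefix]; exact hg2
          have hstep2 : pvRep2 (c :: pvRep1 t) = c :: pvRep2 (pvRep1 t) := by
            simp only [pvRep2, pvRep, hb2, Bool.false_eq_true, if_false]
          rw [hstep1, hstep2, ih t ht]
          simp only [pvScan2, h1, h2, Bool.false_eq_true, if_false]

-- fusing pass 3 into passes 1-2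
lemma pvL3 : ∀ (n : Nat) (l : List Char), l.length ≤ n → pvRep3 (pvScan2 l) = pvScan3 l := by
  intro n
  induction n with
  | zero =>
    intro l hl
    have : l = [] := List.eq_nil_of_length_eq_zero (Nat.le_zero.mp hl)
    subst this; simp [pvRep3, pvRep, pvScan2, pvScan3]
  | succ n ih =>
    intro l hl
    cases l with
    | nil => simp [pvRep3, pvRep, pvScan2, pvScan3]
    | cons c t =>
      by_cases h1 : (['m','a','r','2','0'].isPrefixOf (c :: t)) = true
      · obtain ⟨r, hr⟩ := List.isPrefixOf_iff_prefix.mp h1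
        have hrl : r.length ≤ n := by
          have := congrArg List.length hr; simp at this hl; omega
        rw [← hr]
        have e1 : pvScan2 (['m','a','r','2','0'] ++ r) = ['m','a','r','z','o'] ++ pvScan2 r := by
          simp [pvScan2]
        have e2 : ∀ X, pvRep3 (['m','a','r','z','o'] ++ X) = ['m','a','r','z','o'] ++ pvRep3 X := by
          intro X; simp [pvRep3, pvRep]
        rw [e1, e2, ih r hrl]
        simp [pvScan3]
      · by_cases h2 : (['m','a','r','z','0'].isPrefixOf (c :: t)) = true
        · obtain ⟨r, hr⟩ := List.isPrefixOf_iff_prefix.mp h2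
          have hrl : r.length ≤ n := by
            have := congrArg List.length hr; simp at this hl; omega
          rw [← hr]
          have e1 : pvScan2 (['m','a','r','z','0'] ++ r) = ['m','a','r','z','o'] ++ pvScan2 r := by
            simp [pvScan2]
          have e2 : ∀ X, pvRep3 (['m','a','r','z','o'] ++ X) = ['m','a','r','z','o'] ++ pvRep3 X := by
            intro X; simp [pvRep3, pvRep]
          rw [e1, e2, ih r hrl]
          simp [pvScan3]
        · by_cases h3 : (['s','e','t','i','e','m','b','r','e'].isPrefixOf (c :: t)) = true
          · obtain ⟨r, hr⟩ := List.isPrefixOf_iff_prefix.mp h3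
            have hrl : r.length ≤ n := by
              have := congrArg List.length hr; simp at this hl; omega
            rw [← hr]
            have e1 : ∀ X, pvScan2 (['s','e','t','i','e','m','b','r','e'] ++ X) = ['s','e','t','i','e','m','b','r','e'] ++ pvScan2 X := by
              intro X; simp [pvScan2]
            have e2 : ∀ X, pvRep3 (['s','e','t','i','e','m','b','r','e'] ++ X) = ['s','e','p','t','i','e','m','b','r','e'] ++ pvRep3 X := by
              intro X; simp [pvRep3, pvRep]
            rw [e1, e2, ih r hrl]
            simp [pvScan3]
          · have ht : t.length ≤ n := by simp at hl; omega
            have hT := (pvT2 (n+1) (c :: t) hl).1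
            have h3' : ¬ (['s','e','t','i','e','m','b','r','e'] <+: c :: t) := by
              simpa [List.isPrefixOf_iff_prefix] using h3
            have hstep1 : pvScan2 (c :: t) = c :: pvScan2 t := by
              simp only [pvScan2, h1, h2, Bool.false_eq_true, if_false]
            rw [hstep1] at hT
            have hg3 : ¬ (['s','e','t','i','e','m','b','r','e'] <+: c :: pvScan2 t) := fun hcon => h3' (hT.mp hcon)
            have hb3 : (['s','e','t','i','e','m','b','r','e'].isPrefixOf (c :: pvScan2 t)) = false := by
              rw [← Bool.not_eq_true, List.isPrefixOf_iff_prefix]; exact hg3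
            have hstep2 : pvRep3 (c :: pvScan2 t) = c :: pvRep3 (pvScan2 t) := by
              simp only [pvRep3, pvRep, hb3, Bool.false_eq_true, if_false]
            rw [hstep1, hstep2, ih t ht]
            simp only [pvScan3, h1, h2, h3, Bool.false_eq_true, if_false]

-- fusing pass 4 into passes 1-3: the result is exactly B's one-pass scan
lemma pvL4 : ∀ (n : Nat) (l : List Char), l.length ≤ n → pvRep4 (pvScan3 l) = pvScan l := by
  intro n
  induction n with
  | zero =>
    intro l hl
    have : l = [] := List.eq_nil_of_length_eq_zero (Nat.le_zero.mp hl)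
    subst this; simp [pvRep4, pvRep, pvScan3, pvScan]
  | succ n ih =>
    intro l hl
    cases l with
    | nil => simp [pvRep4, pvRep, pvScan3, pvScan]
    | cons c t =>
      by_cases h1 : (['m','a','r','2','0'].isPrefixOf (c :: t)) = true
      · obtain ⟨r, hr⟩ := List.isPrefixOf_iff_prefix.mp h1
        have hrl : r.length ≤ n := by
          have := congrArg List.length hr; simp at this hl; omega
        rw [← hr]
        have e1 : pvScan3 (['m','a','r','2','0'] ++ r) = ['m','a','r','z','o'] ++ pvScan3 r := by
          simp [pvScan3]
        have e2 : ∀ X, pvRep4 (['m','a','r','z','o'] ++ X) = ['m','a','r','z','o'] ++ pvRep4 X := by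
          intro X; simp [pvRep4, pvRep]
        rw [e1, e2, ih r hrl]
        simp [pvScan, pvTLmar20, pvTLmarzo]
      · by_cases h2 : (['m','a','r','z','0'].isPrefixOf (c :: t)) = true
        · obtain ⟨r, hr⟩ := List.isPrefixOf_iff_prefix.mp h2
          have hrl : r.length ≤ n := by
            have := congrArg List.length hr; simp at this hl; omega
          rw [← hr]
          have e1 : pvScan3 (['m','a','r','z','0'] ++ r) = ['m','a','r','z','o'] ++ pvScan3 r := by
            simp [pvScan3]
          have e2 : ∀ X, pvRep4 (['m','a','r','z','o'] ++ X) = ['m','a','r','z','o'] ++ pvRep4 X := by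
            intro X; simp [pvRep4, pvRep]
          rw [e1, e2, ih r hrl]
          simp [pvScan, pvTLmar20, pvTLmarz0, pvTLmarzo]
        · by_cases h3 : (['s','e','t','i','e','m','b','r','e'].isPrefixOf (c :: t)) = true
          · obtain ⟨r, hr⟩ := List.isPrefixOf_iff_prefix.mp h3
            have hrl : r.length ≤ n := by
              have := congrArg List.length hr; simp at this hl; omega
            rw [← hr]
            have e1 : pvScan3 (['s','e','t','i','e','m','b','r','e'] ++ r) = ['s','e','p','t','i','e','m','b','r','e'] ++ pvScan3 r := by
              simp [pvScan3]
            have e2 : ∀ X, pvRep4 (['s','e','p','t','i','e','m','b','r','e'] ++ X) = ['s','e','p','t','i','e','m','b','r','e'] ++ pvRep4 X := by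
              intro X; simp [pvRep4, pvRep]
            rw [e1, e2, ih r hrl]
            simp [pvScan, pvTLmar20, pvTLmarz0, pvTLsetiembre, pvTLseptiembre]
          · by_cases h4 : (['n','o','v','i','e','n','b','r','e'].isPrefixOf (c :: t)) = true
            · obtain ⟨r, hr⟩ := List.isPrefixOf_iff_prefix.mp h4
              have hrl : r.length ≤ n := by
                have := congrArg List.length hr; simp at this hl; omega
              rw [← hr]
              have e1 : ∀ X, pvScan3 (['n','o','v','i','e','n','b','r','e'] ++ X) = ['n','o','v','i','e','n','b','r','e'] ++ pvScan3 X := by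
                intro X; simp [pvScan3]
              have e2 : ∀ X, pvRep4 (['n','o','v','i','e','n','b','r','e'] ++ X) = ['n','o','v','i','e','m','b','r','e'] ++ pvRep4 X := by
                intro X; simp [pvRep4, pvRep]
              rw [e1, e2, ih r hrl]
              simp [pvScan, pvTLmar20, pvTLmarz0, pvTLsetiembre, pvTLnovienbre, pvTLnoviembre]
            · have ht : t.length ≤ n := by simp at hl; omega
              have hT := (pvT3 (n+1) (c :: t) hl).1
              have h4' : ¬ (['n','o','v','i','e','n','b','r','e'] <+: c :: t) := by
                simpa [List.isPrefixOf_iff_prefix] using h4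
              have hstep1 : pvScan3 (c :: t) = c :: pvScan3 t := by
                simp only [pvScan3, h1, h2, h3, Bool.false_eq_true, if_false]
              rw [hstep1] at hT
              have hg4 : ¬ (['n','o','v','i','e','n','b','r','e'] <+: c :: pvScan3 t) := fun hcon => h4' (hT.mp hcon)
              have hb4 : (['n','o','v','i','e','n','b','r','e'].isPrefixOf (c :: pvScan3 t)) = false := by
                rw [← Bool.not_eq_true, List.isPrefixOf_iff_prefix]; exact hg4
              have hstep2 : pvRep4 (c :: pvScan3 t) = c :: pvRep4 (pvScan3 t) := by
                simp only [pvRep4, pvRep, hb4, Bool.false_eq_true, if_false]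
              rw [hstep1, hstep2, ih t ht]
              rw [pvScan]
              simp only [pvTLmar20, pvTLmarz0, pvTLsetiembre, pvTLnovienbre, h1, h2, h3, h4,
                Bool.false_eq_true, if_false]

-- ===== VERDICT (by name: the statement is the Claim_ definition above) =====
theorem limpiar_texto_spec : Claim_equal_limpiar_texto := by
  intro texto _
  unfold Spec_limpiar_texto limpiar_texto limpiar_texto_alt
  apply String.toList_inj.mp
  simp only [PySem.Str.toList_replace, String.toList_ofList,
    pvTLmar20, pvTLmarz0, pvTLmarzo, pvTLsetiembre, pvTLseptiembre, pvTLnovienbre, pvTLnoviembre]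
  rw [pvReplace_eq, pvReplace_eq, pvReplace_eq, pvReplace_eq]
  rw [show pvRep 'm' ['a','r','2','0'] ['m','a','r','z','o'] = pvRep1 from rfl,
      show pvRep 'm' ['a','r','z','0'] ['m','a','r','z','o'] = pvRep2 from rfl,
      show pvRep 's' ['e','t','i','e','m','b','r','e'] ['s','e','p','t','i','e','m','b','r','e'] = pvRep3 from rfl,
      show pvRep 'n' ['o','v','i','e','n','b','r','e'] ['n','o','v','i','e','m','b','r','e'] = pvRep4 from rfl]
  rw [pvL2 _ _ le_rfl, pvL3 _ _ le_rfl, pvL4 _ _ le_rfl]
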